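-- pv_equiv track=rewrite | github.com/joshuawlim/kenny-v4 | scripts/mail_validator.py | _analyze_threads
-- ===== SOURCE A (Python) =====
-- from typing import Dict, List, Tuple
--
-- def _analyze_threads(emails: List[Dict]) -> Dict:
--     """Analyze email thread patterns"""
--     thread_ids = [email.get('thread_id', '') for email in emails if email.get('thread_id', '')]
--     unique_threads = set(thread_ids)
--
--     thread_counts = {}
--     for thread_id in thread_ids:
--         thread_counts[thread_id] = thread_counts.get(thread_id, 0) + 1
--
--     # Find threads with multiple emails
--     conversation_threads = {k: v for k, v in thread_counts.items() if v > 1}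
--
--     return {
--         'total_emails_with_threads': len(thread_ids),
--         'unique_threads': len(unique_threads),
--         'conversation_threads': len(conversation_threads),
--         'avg_thread_length': sum(conversation_threads.values()) // len(conversation_threads) if conversation_threads else 0,
--         'longest_thread_length': max(conversation_threads.values()) if conversation_threads else 0
--     }
-- ===== SOURCE B (Python) =====
-- def _group_lengths(ids):
--     """Run-length encode a list: lengths of maximal runs of equal adjacent elements."""
--     if not ids:
--         return []
--     x = ids[0]
--     i = 1
--     while i < len(ids) and ids[i] == x:
--         i += 1
--     return [i] + _group_lengths(ids[i:])
--
-- def _analyze_threads(emails):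
--     """Analyze email thread patterns (sort-then-group instead of dict counting)."""
--     ids = sorted(e.get('thread_id', '') for e in emails if e.get('thread_id', ''))
--     lengths = _group_lengths(ids)
--     conv = [n for n in lengths if n > 1]
--     return {
--         'total_emails_with_threads': len(ids),
--         'unique_threads': len(lengths),
--         'conversation_threads': len(conv),
--         'avg_thread_length': sum(conv) // len(conv) if conv else 0,
--         'longest_thread_length': max(conv) if conv else 0,
--     }
-- ===== Notes on version B (the rewrite author's own statement) =====
-- stated objective: alternative
-- what changed: Replaces the hash-dict counting (Counter-style dict, set, and dict comprehension) by sorting the thread ids and run-length encoding the sorted list, deriving all five statistics from the multiset of run lengths.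
import Mathlib
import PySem

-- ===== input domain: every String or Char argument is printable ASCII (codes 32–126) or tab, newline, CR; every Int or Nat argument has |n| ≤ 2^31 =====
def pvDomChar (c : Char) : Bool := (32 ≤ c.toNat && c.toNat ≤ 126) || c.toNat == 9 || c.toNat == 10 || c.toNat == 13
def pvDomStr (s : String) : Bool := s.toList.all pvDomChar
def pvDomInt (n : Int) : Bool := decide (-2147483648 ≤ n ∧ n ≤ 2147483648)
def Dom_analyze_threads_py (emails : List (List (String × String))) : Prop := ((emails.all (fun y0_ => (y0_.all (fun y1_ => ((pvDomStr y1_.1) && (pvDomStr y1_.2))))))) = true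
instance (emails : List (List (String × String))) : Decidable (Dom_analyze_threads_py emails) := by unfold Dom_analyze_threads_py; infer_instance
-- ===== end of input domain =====

-- B replaces A's hash-dict counting by sort + run-length encoding of the thread ids; same results, a genuinely different algorithm (objective: alternative).

-- ===== PORT A =====
def analyze_threads_py (emails : List (List (String × String))) : List (String × Int) :=
  let thread_ids := (emails.filter (fun e => decide ((PySem.Dict.mk e).getD "thread_id" "" ≠ ""))).map
      (fun e => (PySem.Dict.mk e).getD "thread_id" "")
  let unique_threads := PySem.Set.ofList thread_ids
  let thread_counts := thread_ids.foldl (fun d t => d.insert t (d.getD t 0 + 1)) PySem.Dict.empty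
  -- dict comprehension over items with unique keys, ported as its association list
  let conversation_threads := thread_counts.items.filter (fun p => decide (1 < p.2))
  [("total_emails_with_threads", (thread_ids.length : Int)),
   ("unique_threads", (unique_threads.length : Int)),
   ("conversation_threads", (conversation_threads.length : Int)),
   ("avg_thread_length", if conversation_threads.isEmpty then 0
      else PySem.Int.floordiv ((conversation_threads.map (·.2)).sum) (conversation_threads.length : Int)),
   ("longest_thread_length", if conversation_threads.isEmpty then 0
      else (PySem.List.max? (conversation_threads.map (·.2)) (fun v => v)).getD 0)]

-- ===== PORT B =====
-- port of _group_lengths: i = 1 + leading run of ids[0]; recurse on ids[i:]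
def pvGroupLengths : List String → List Int
  | [] => []
  | x :: xs =>
      ((1 : Int) + ((xs.takeWhile (fun y => y == x)).length : Int)) ::
        pvGroupLengths (xs.dropWhile (fun y => y == x))
termination_by l => l.length
decreasing_by
  exact Nat.lt_succ_of_le (List.dropWhile_sublist _).length_le

def analyze_threads_py_alt (emails : List (List (String × String))) : List (String × Int) :=
  let ids := PySem.List.sorted
      ((emails.filter (fun e => decide ((PySem.Dict.mk e).getD "thread_id" "" ≠ ""))).map
        (fun e => (PySem.Dict.mk e).getD "thread_id" "")) (fun x => x) false
  let lengths := pvGroupLengths ids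
  let conv := lengths.filter (fun n => decide (1 < n))
  [("total_emails_with_threads", (ids.length : Int)),
   ("unique_threads", (lengths.length : Int)),
   ("conversation_threads", (conv.length : Int)),
   ("avg_thread_length", if conv.isEmpty then 0
      else PySem.Int.floordiv conv.sum (conv.length : Int)),
   ("longest_thread_length", if conv.isEmpty then 0
      else (PySem.List.max? conv (fun v => v)).getD 0)]

-- ===== PRECONDITION & SPEC =====
def Spec_analyze_threads_py (emails : List (List (String × String))) (out : List (String × Int)) : Prop := out = analyze_threads_py_alt emails
instance (emails : List (List (String × String))) (out : List (String × Int)) : Decidable (Spec_analyze_threads_py emails out) := by unfold Spec_analyze_threads_py; infer_instance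

-- ===== CLAIM (what is proved, stated in full; the proofs are below) =====
def Claim_equal_analyze_threads_py : Prop := ∀ (emails : List (List (String × String))), Dom_analyze_threads_py emails → Spec_analyze_threads_py emails (analyze_threads_py emails)

-- ===== LEMMAS AND PROOFS =====

-- prepending a fresh element commutes with folding Set.add
theorem pv_foldl_add_cons (dr : List String) (s : List String) (a : String)
    (h : a ∉ dr) : List.foldl PySem.Set.add (a :: s) dr = a :: List.foldl PySem.Set.add s dr := by
  induction dr generalizing s with
  | nil => rfl
  | cons y ys ih =>
      have hya : y ≠ a := fun hy => h (hy ▸ List.mem_cons_self)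
      have hadd : PySem.Set.add (a :: s) y = a :: PySem.Set.add s y := by
        simp only [PySem.Set.add, PySem.Set.contains, List.contains_cons]
        have : (y == a) = false := by simpa using hya
        rw [this]
        simp only [Bool.false_or]
        split <;> rfl
      simp only [List.foldl_cons, hadd]
      exact ih _ (fun hmem => h (List.mem_cons_of_mem _ hmem))

-- dedup of a list whose head's duplicates are all adjacent
theorem pv_dedup_run (x : String) (tk dr : List String)
    (htk : ∀ y ∈ tk, y = x) (hdr : x ∉ dr) :
    PySem.List.dedup (x :: (tk ++ dr)) = x :: PySem.List.dedup dr := by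
  simp only [PySem.List.dedup, PySem.Set.ofList, List.foldl_append, List.foldl_cons]
  have h0 : PySem.Set.add PySem.Set.empty x = [x] := rfl
  rw [h0]
  have htkfold : List.foldl PySem.Set.add [x] tk = [x] := by
    induction tk with
    | nil => rfl
    | cons y ys ih =>
        have hy : y = x := htk y List.mem_cons_self
        have : PySem.Set.add [x] y = [x] := by
          simp [PySem.Set.add, PySem.Set.contains, hy]
        simp only [List.foldl_cons, this]
        exact ih (fun z hz => htk z (List.mem_cons_of_mem _ hz))
  rw [htkfold]
  exact pv_foldl_add_cons dr [] x hdr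

-- run lengths of a nondecreasing list are the counts of its distinct elements
theorem pv_groupLengths_sorted (l : List String) (hp : l.Pairwise (· ≤ ·)) :
    pvGroupLengths l = (PySem.List.dedup l).map (fun k => (List.count k l : Int)) := by
  induction l using pvGroupLengths.induct with
  | case1 => simp [pvGroupLengths, PySem.List.dedup, PySem.Set.ofList, PySem.Set.empty]
  | case2 x xs ih =>
      rw [pvGroupLengths]
      set tk := xs.takeWhile (fun y => y == x) with htkdef
      set dr := xs.dropWhile (fun y => y == x) with hdrdef
      have hxs : tk ++ dr = xs := List.takeWhile_append_dropWhile
      have htk : ∀ y ∈ tk, y = x := by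
        intro y hy
        have := List.mem_takeWhile_imp hy
        simpa using this
      have hdr : x ∉ dr := by
        intro hx
        have hdrne : dr ≠ [] := List.ne_nil_of_mem hx
        have hhne : ((dr.head hdrne) == x) = false := by
          simpa [← hdrdef] using List.head_dropWhile_not (fun y => y == x) (l := xs)
            (by simpa [← hdrdef] using hdrne)
        have hhx : dr.head hdrne ≠ x := by simpa using hhne
        have hxall : ∀ y ∈ xs, x ≤ y := (List.pairwise_cons.mp hp).1
        have hxh : x ≤ dr.head hdrne := hxall _ (by
          rw [← hxs]; exact List.mem_append_right _ (List.head_mem hdrne))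
        have hdrpair : dr.Pairwise (· ≤ ·) := by
          have hsub : dr.Sublist (x :: xs) := by
            rw [← hxs]; exact (List.sublist_append_right tk dr).cons x
          exact List.Pairwise.sublist hsub hp
        cases hdrd : dr with
        | nil => exact hdrne hdrd
        | cons h t =>
            rw [hdrd] at hx
            have hhead : dr.head hdrne = h := by simp [hdrd]
            rcases List.mem_cons.mp hx with hxh' | hxt
            · exact hhx (hhead ▸ hxh'.symm)
            · have hht : ∀ y ∈ t, h ≤ y := (List.pairwise_cons.mp (hdrd ▸ hdrpair)).1
              have hle : h ≤ x := hht x hxt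
              exact hhx (hhead ▸ (le_antisymm hle (hhead ▸ hxh)))
      have hdrpair : dr.Pairwise (· ≤ ·) := by
        have hsub : dr.Sublist (x :: xs) := by
          rw [← hxs]; exact (List.sublist_append_right tk dr).cons x
        exact List.Pairwise.sublist hsub hp
      have hded : PySem.List.dedup (x :: xs) = x :: PySem.List.dedup dr := by
        rw [← hxs]; exact pv_dedup_run x tk dr htk hdr
      have hcx : List.count x (x :: xs) = tk.length + 1 := by
        have htkc : List.count x tk = tk.length := by
          rw [List.count_eq_length]
          intro y hy
          simpa using (htk y hy).symm
        have hdrc : List.count x dr = 0 := List.count_eq_zero.mpr hdr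
        rw [← hxs]
        simp [List.count_append, htkc, hdrc]
      have hcrest : ∀ k ∈ PySem.List.dedup dr, List.count k (x :: xs) = List.count k dr := by
        intro k hk
        have hkdr : k ∈ dr := (PySem.Set.mem_ofList dr k).mp (by
          simpa [PySem.List.dedup] using hk)
        have hkx : k ≠ x := fun he => hdr (he ▸ hkdr)
        have htkc : List.count k tk = 0 := List.count_eq_zero.mpr (fun hmem => hkx (htk k hmem))
        rw [← hxs]
        simp [List.count_cons, List.count_append, htkc]
        exact fun he => hkx he.symm
      rw [hded, List.map_cons]
      congr 1
      · rw [hcx]; push_cast; ring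
      · rw [ih hdrpair]
        refine List.map_congr_left ?_
        intro k hk
        rw [hcrest k hk]

-- the run lengths of sorted l are a permutation of the per-distinct-element counts of l
theorem pv_groupLengths_perm (l : List String) :
    (pvGroupLengths (PySem.List.sorted l (fun x => x) false)).Perm
      ((PySem.Set.ofList l).map (fun k => (List.count k l : Int))) := by
  set s := PySem.List.sorted l (fun x => x) false with hs
  have hperm : s.Perm l := PySem.List.sorted_perm l (fun x => x) false
  have hpair : s.Pairwise (· ≤ ·) := by
    simp only [hs]
    exact PySem.List.sorted_pairwise l (fun x => x)
  rw [pv_groupLengths_sorted s hpair]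
  have hdperm : (PySem.List.dedup s).Perm (PySem.Set.ofList l) := by
    rw [List.perm_ext_iff_of_nodup (by simp [PySem.List.dedup, PySem.Set.nodup_ofList])
      (PySem.Set.nodup_ofList l)]
    intro a
    simp only [PySem.List.dedup]
    rw [PySem.Set.mem_ofList, PySem.Set.mem_ofList]
    exact hperm.mem_iff
  have hmapeq : (PySem.List.dedup s).map (fun k => (List.count k s : Int))
      = (PySem.List.dedup s).map (fun k => (List.count k l : Int)) :=
    List.map_congr_left (fun k _ => by rw [hperm.count_eq])
  rw [hmapeq]
  exact hdperm.map _

-- max? over permuted Int lists agree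
theorem pv_max?_perm (xs ys : List Int) (h : xs.Perm ys) :
    PySem.List.max? xs (fun v => v) = PySem.List.max? ys (fun v => v) := by
  cases hxs : PySem.List.max? xs (fun v => v) with
  | none =>
      have hx : xs = [] := (PySem.List.max?_eq_none_iff _ _).mp hxs
      have hy : ys = [] := by
        have hl := h.length_eq
        rw [hx] at hl
        exact List.length_eq_zero_iff.mp hl.symm
      rw [hy]
      exact ((PySem.List.max?_eq_none_iff _ _).mpr rfl).symm
  | some m =>
      cases hys : PySem.List.max? ys (fun v => v) with
      | none =>
          have hy : ys = [] := (PySem.List.max?_eq_none_iff _ _).mp hys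
          have hx : xs = [] := by
            have hl := h.length_eq
            rw [hy] at hl
            exact List.length_eq_zero_iff.mp hl
          rw [(PySem.List.max?_eq_none_iff _ _).mpr hx] at hxs
          simp at hxs
      | some m' =>
          have hm : m ∈ xs := PySem.List.max?_mem hxs
          have hm' : m' ∈ ys := PySem.List.max?_mem hys
          have h1 : m ≤ m' := PySem.List.max?_isMax hys m (h.mem_iff.mp hm)
          have h2 : m' ≤ m := PySem.List.max?_isMax hxs m' (h.mem_iff.mpr hm')
          rw [le_antisymm h1 h2]

-- ===== VERDICT (by name: the statement is the Claim_ definition above) =====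
theorem analyze_threads_py_spec : Claim_equal_analyze_threads_py := by
  intro emails _
  simp only [Spec_analyze_threads_py, analyze_threads_py, analyze_threads_py_alt]
  set ids := (emails.filter (fun e => decide ((PySem.Dict.mk e).getD "thread_id" "" ≠ ""))).map
      (fun e => (PySem.Dict.mk e).getD "thread_id" "") with hids
  set sids := PySem.List.sorted ids (fun x => x) false with hsids
  -- A's counter dict and its conversation values
  rw [PySem.Dict.foldl_insert_getD_add_one_eq_counter, PySem.Dict.items_counter]
  -- both conversation-value lists are filters of permuted count lists
  have hperm : (pvGroupLengths sids).Perm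
      ((PySem.Set.ofList ids).map (fun k => (List.count k ids : Int))) :=
    pv_groupLengths_perm ids
  have hvalA : (((PySem.Set.ofList ids).map (fun k => (k, (List.count k ids : Int)))).filter
        (fun p => decide (1 < p.2))).map (fun p => p.2)
      = ((PySem.Set.ofList ids).map (fun k => (List.count k ids : Int))).filter
        (fun n => decide (1 < n)) := by
    rw [List.filter_map, List.filter_map, List.map_map]
    rfl
  have hconv : (((PySem.Set.ofList ids).map (fun k => (k, (List.count k ids : Int)))).filter
        (fun p => decide (1 < p.2))).map (fun p => p.2)
      |>.Perm ((pvGroupLengths sids).filter (fun n => decide (1 < n))) := by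
    rw [hvalA]
    exact (hperm.filter _).symm
  have hlenconv : (((PySem.Set.ofList ids).map (fun k => (k, (List.count k ids : Int)))).filter
        (fun p => decide (1 < p.2))).length
      = ((pvGroupLengths sids).filter (fun n => decide (1 < n))).length := by
    have := hconv.length_eq
    simpa using this
  simp only [List.cons.injEq, Prod.mk.injEq, and_true, true_and]
  refine ⟨?_, ?_, ?_, ?_, ?_⟩
  · exact_mod_cast (PySem.List.sorted_perm ids (fun x => x) false).length_eq.symm
  · have h1 := hperm.length_eq
    rw [List.length_map] at h1
    exact_mod_cast h1.symm
  · exact_mod_cast hlenconv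
  · have hemp : (((PySem.Set.ofList ids).map (fun k => (k, (List.count k ids : Int)))).filter
        (fun p => decide (1 < p.2))).isEmpty
      = ((pvGroupLengths sids).filter (fun n => decide (1 < n))).isEmpty := by
      rw [Bool.eq_iff_iff, List.isEmpty_iff_length_eq_zero, List.isEmpty_iff_length_eq_zero, hlenconv]
    rw [hemp]
    split
    · rfl
    · rw [hconv.sum_eq, hlenconv]
  · have hemp : (((PySem.Set.ofList ids).map (fun k => (k, (List.count k ids : Int)))).filter
        (fun p => decide (1 < p.2))).isEmpty
      = ((pvGroupLengths sids).filter (fun n => decide (1 < n))).isEmpty := by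
      rw [Bool.eq_iff_iff, List.isEmpty_iff_length_eq_zero, List.isEmpty_iff_length_eq_zero, hlenconv]
    rw [hemp]
    split
    · rfl
    · rw [pv_max?_perm _ _ hconv]
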